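-- pv_equiv track=rewrite | github.com/rzwiefel/Artifical-Intellectuals-cse471 | hw1/c3q9/main.py | dfs
-- ===== SOURCE A (Python) =====
-- import operator
--
-- goal_state = (0, 0, False)
--
-- actions = ((1, 1), (2, 0), (0, 2), (1, 0), (0, 1))
--
-- def valid(state):
--     return all((0 <= state[0] <= 3,     # Must be valid number of missionaries
--             0 <= state[1] <= 3,         # Must be valid number of cannibals
--             (state[0] >= state[1] or state[0] == 0),    # Must be equal or more M's than C's or no M's (left side)
--             (state[0] <= state[1] or state[0] == 3)))   # The other side must follow same conditions
--
-- def dfs(state, seen):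
--     if state in seen:  # Check if we've seen this state already
--         return []
--     if not valid(state):
--         return []
--     if goal_state == state:
--         return [state]
--     seen.append(state)  # Add current state to seen list
--     op = operator.sub if state[2] else operator.add  # Choose the operator based on if the boat is here
--     for action in actions:  # iterate  through each of the actions
--         res = dfs((op(state[0], action[0]), op(state[1], action[1]), not state[2]), seen)
--         if res:
--             return [state] + res
-- ===== SOURCE B (Python) =====
-- goal_state = (0, 0, False)
--
-- actions = ((1, 1), (2, 0), (0, 2), (1, 0), (0, 1))
--
-- def valid(state):
--     m, c, _ = state
--     return 0 <= m <= 3 and 0 <= c <= 3 and (m >= c or m == 0) and (m <= c or m == 3)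
--
-- def _children(state, path):
--     m, c, boat = state
--     sign = -1 if boat else 1
--     return [((m + sign * dm, c + sign * dc, not boat), path) for dm, dc in reversed(actions)]
--
-- def dfs(state, seen):
--     if state in seen:
--         return []
--     if not valid(state):
--         return []
--     if state == goal_state:
--         return [state]
--     seen.append(state)
--     stack = _children(state, [state])
--     while stack:
--         s, p = stack.pop()
--         if s in seen or not valid(s):
--             continue
--         if s == goal_state:
--             return p + [s]
--         seen.append(s)
--         stack.extend(_children(s, p + [s]))
--     return None
-- ===== Notes on version B (the rewrite author's own statement) =====
-- stated objective: alternative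
-- what changed: The recursive DFS is replaced by an explicit stack-based iteration that carries (state, path) frames, pushing the five children in reversed action order so pop order matches the recursion, with no recursion at all.
import Mathlib
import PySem

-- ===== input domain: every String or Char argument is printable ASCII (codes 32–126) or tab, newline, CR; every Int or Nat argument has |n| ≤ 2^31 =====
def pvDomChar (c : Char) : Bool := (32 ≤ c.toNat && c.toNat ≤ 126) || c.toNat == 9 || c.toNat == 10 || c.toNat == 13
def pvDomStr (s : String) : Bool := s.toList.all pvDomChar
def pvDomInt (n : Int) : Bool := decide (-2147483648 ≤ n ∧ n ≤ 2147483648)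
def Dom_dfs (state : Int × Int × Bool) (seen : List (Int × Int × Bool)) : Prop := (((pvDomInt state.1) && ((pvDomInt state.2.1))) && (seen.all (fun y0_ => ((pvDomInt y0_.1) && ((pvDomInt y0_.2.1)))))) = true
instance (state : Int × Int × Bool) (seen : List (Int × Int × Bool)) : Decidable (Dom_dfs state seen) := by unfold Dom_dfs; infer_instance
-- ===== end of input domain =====

-- B replaces the recursive DFS by an explicit stack iteration carrying (state, path) frames
-- (alternative decomposition, same search and same return value; both Pythons also append to
-- the caller-visible `seen` in the same order — the theorem here is about the return value).

-- ===== PORT A =====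
-- module constants shared by both Pythons
def goalStateP : Int × Int × Bool := (0, 0, false)

def actionsP : List (Int × Int) := [(1,1),(2,0),(0,2),(1,0),(0,1)]

def validP (s : Int × Int × Bool) : Bool :=
  decide (0 ≤ s.1) && decide (s.1 ≤ 3) &&
  (decide (0 ≤ s.2.1) && decide (s.2.1 ≤ 3)) &&
  (decide (s.2.1 ≤ s.1) || decide (s.1 = 0)) &&
  (decide (s.1 ≤ s.2.1) || decide (s.1 = 3))

-- A's child state: op = operator.sub if boat is on the other side, else operator.add
def stepP (s : Int × Int × Bool) (a : Int × Int) : Int × Int × Bool :=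
  if s.2.2 then (s.1 - a.1, s.2.1 - a.2, !s.2.2) else (s.1 + a.1, s.2.1 + a.2, !s.2.2)

-- Python's recursion mutates `seen`, so the port threads it: result = (return value, seen after).
-- The Nat argument is fuel that only makes the recursion total; dfs calls it with fuel 32,
-- which is never exhausted (each level appends a fresh member of the 20 valid states).
mutual
def dfsGo : Nat → (Int × Int × Bool) → List (Int × Int × Bool) →
    Option (List (Int × Int × Bool)) × List (Int × Int × Bool)
  | 0, _, seen => (none, seen)
  | f+1, s, seen =>
    if s ∈ seen then (some [], seen)
    else if validP s = false then (some [], seen)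
    else if goalStateP = s then (some [s], seen)
    else tryActs f actionsP s (seen ++ [s])
  termination_by f _ _ => (f, 0)
def tryActs : Nat → List (Int × Int) → (Int × Int × Bool) → List (Int × Int × Bool) →
    Option (List (Int × Int × Bool)) × List (Int × Int × Bool)
  | _, [], _, seen => (none, seen)
  | f, a :: as, s, seen =>
    match dfsGo f (stepP s a) seen with
    | (some (h :: t), seen') => (some (s :: h :: t), seen')
    | (_, seen') => tryActs f as s seen'
  termination_by f as _ _ => (f, as.length + 1)
end

def dfs (state : Int × Int × Bool) (seen : List (Int × Int × Bool)) : Option (List (Int × Int × Bool)) :=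
  (dfsGo 32 state seen).1

-- ===== PORT B =====
-- B's child state: sign = -1 if boat else 1, componentwise m + sign*dm
def stepB (s : Int × Int × Bool) (a : Int × Int) : Int × Int × Bool :=
  (s.1 + (if s.2.2 then (-1 : Int) else 1) * a.1,
   s.2.1 + (if s.2.2 then (-1 : Int) else 1) * a.2, !s.2.2)

-- _children(state, path): frames for reversed(actions) (Python list order, end = top of stack)
def childrenB (s : Int × Int × Bool) (p : List (Int × Int × Bool)) :
    List ((Int × Int × Bool) × List (Int × Int × Bool)) :=
  actionsP.reverse.map (fun a => (stepB s a, p))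

-- termination infrastructure for the stack loop (cited in its decreasing_by):
-- the 20 valid states, and the count of valid states not yet seen
def validStates : List (Int × Int × Bool) :=
  [(0,0,false),(0,0,true),(0,1,false),(0,1,true),(0,2,false),(0,2,true),
   (0,3,false),(0,3,true),(1,1,false),(1,1,true),(2,2,false),(2,2,true),
   (3,0,false),(3,0,true),(3,1,false),(3,1,true),(3,2,false),(3,2,true),
   (3,3,false),(3,3,true)]

def muB (seen : List (Int × Int × Bool)) : Nat :=
  (validStates.filter (fun v => decide (v ∉ seen))).length

theorem mem_validStates_of_valid {s : Int × Int × Bool} (h : validP s = true) :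
    s ∈ validStates := by
  obtain ⟨m, c, b⟩ := s
  simp only [validP, Bool.and_eq_true, Bool.or_eq_true, decide_eq_true_eq] at h
  obtain ⟨⟨⟨⟨h1, h2⟩, h3, h4⟩, h5⟩, h6⟩ := h
  interval_cases m <;> interval_cases c <;> cases b <;>
    first
    | decide
    | (exfalso; rcases h5 with h5 | h5 <;> rcases h6 with h6 | h6 <;> omega)

theorem pvFilterLenLe {α : Type} (l : List α) (p q : α → Bool)
    (h : ∀ x, q x = true → p x = true) :
    (l.filter q).length ≤ (l.filter p).length := by
  induction l with
  | nil => simp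
  | cons a l ih =>
    cases hq : q a
    · rw [List.filter_cons_of_neg (by simp [hq])]
      cases hp : p a
      · rw [List.filter_cons_of_neg (by simp [hp])]; exact ih
      · rw [List.filter_cons_of_pos hp]; simp only [List.length_cons]; omega
    · rw [List.filter_cons_of_pos hq, List.filter_cons_of_pos (h a hq)]
      simp only [List.length_cons]; omega

theorem pvFilterLenLt {α : Type} (l : List α) (p q : α → Bool) (s : α)
    (hmem : s ∈ l) (himp : ∀ x, q x = true → p x = true)
    (hqs : q s = false) (hps : p s = true) :
    (l.filter q).length < (l.filter p).length := by
  induction l with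
  | nil => simp at hmem
  | cons a l ih =>
    by_cases heq : a = s
    · subst heq
      rw [List.filter_cons_of_neg (by simp [hqs]), List.filter_cons_of_pos hps]
      have hle := pvFilterLenLe l p q himp
      simp only [List.length_cons]; omega
    · have hmem' : s ∈ l := by
        rcases List.mem_cons.mp hmem with h | h
        · exact absurd h.symm heq
        · exact h
      have hlt := ih hmem'
      cases hq : q a
      · rw [List.filter_cons_of_neg (by simp [hq])]
        cases hp : p a
        · rw [List.filter_cons_of_neg (by simp [hp])]; exact hlt
        · rw [List.filter_cons_of_pos hp]; simp only [List.length_cons]; omega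
      · rw [List.filter_cons_of_pos hq, List.filter_cons_of_pos (himp a hq)]
        simp only [List.length_cons]; omega

theorem muB_append_lt {s : Int × Int × Bool} {seen : List (Int × Int × Bool)}
    (hv : validP s = true) (hs : s ∉ seen) : muB (seen ++ [s]) < muB seen := by
  unfold muB
  refine pvFilterLenLt validStates _ _ s (mem_validStates_of_valid hv) ?_ (by simp) (by simpa using hs)
  intro x hx
  simp only [decide_eq_true_eq] at *
  exact fun hm => hx (List.mem_append_left _ hm)

def loopB : List ((Int × Int × Bool) × List (Int × Int × Bool)) → List (Int × Int × Bool) →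
    Option (List (Int × Int × Bool))
  | [], _ => none
  | (s, p) :: rest, seen =>
    if s ∈ seen ∨ validP s = false then loopB rest seen
    else if s = goalStateP then some (p ++ [s])
    else loopB ((childrenB s (p ++ [s])).reverse ++ rest) (seen ++ [s])
termination_by stack seen => (muB seen, stack.length)
decreasing_by
  · exact Prod.Lex.right _ (Nat.lt_succ_self _)
  · rename_i h _
    push Not at h
    exact Prod.Lex.left _ _ (muB_append_lt (by simpa using h.2) h.1)

def dfs_alt (state : Int × Int × Bool) (seen : List (Int × Int × Bool)) :
    Option (List (Int × Int × Bool)) :=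
  if state ∈ seen then some []
  else if validP state = false then some []
  else if state = goalStateP then some [state]
  else loopB (childrenB state [state]).reverse (seen ++ [state])

-- ===== PRECONDITION & SPEC =====
def Spec_dfs (state : Int × Int × Bool) (seen : List (Int × Int × Bool)) (out : Option (List (Int × Int × Bool))) : Prop := out = dfs_alt state seen
instance (state : Int × Int × Bool) (seen : List (Int × Int × Bool)) (out : Option (List (Int × Int × Bool))) : Decidable (Spec_dfs state seen out) := by unfold Spec_dfs; infer_instance

-- ===== CLAIM (what is proved, stated in full; the proofs are below) =====
def Claim_equal_dfs : Prop := ∀ (state : Int × Int × Bool) (seen : List (Int × Int × Bool)), Dom_dfs state seen → Spec_dfs state seen (dfs state seen)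

-- ===== LEMMAS AND PROOFS =====

theorem stepB_eq (s : Int × Int × Bool) (a : Int × Int) : stepB s a = stepP s a := by
  obtain ⟨m, c, b⟩ := s
  cases b <;> simp [stepB, stepP] <;> constructor <;> ring

-- the reversed child frames, as a straight map over the actions (top of stack first)
theorem childrenB_reverse (s : Int × Int × Bool) (p : List (Int × Int × Bool)) :
    (childrenB s p).reverse = actionsP.map (fun a => (stepP s a, p)) := by
  simp [childrenB, stepB_eq]

theorem muB_le_20 (seen : List (Int × Int × Bool)) : muB seen ≤ 20 := by
  have := List.length_filter_le (fun v => decide (v ∉ seen)) validStates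
  simpa [muB, validStates] using this

theorem muB_mono {seen t : List (Int × Int × Bool)} : muB (seen ++ t) ≤ muB seen := by
  refine pvFilterLenLe validStates _ _ ?_
  intro x hx
  simp only [decide_eq_true_eq] at *
  exact fun hm => hx (List.mem_append_left _ hm)

-- `seen` only ever grows (A appends, never removes)
theorem seen_grows : ∀ f : Nat,
    (∀ s seen, ∃ t, (dfsGo f s seen).2 = seen ++ t) ∧
    (∀ as s seen, ∃ t, (tryActs f as s seen).2 = seen ++ t) := by
  intro f
  induction f with
  | zero =>
    refine ⟨fun s seen => ⟨[], by simp [dfsGo]⟩, ?_⟩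
    intro as
    induction as with
    | nil => exact fun s seen => ⟨[], by simp [tryActs]⟩
    | cons a as iha =>
      intro s seen
      rw [tryActs]
      simp only [dfsGo]
      exact iha s seen
  | succ f ih =>
    have hD : ∀ s seen, ∃ t, (dfsGo (f+1) s seen).2 = seen ++ t := by
      intro s seen
      rw [dfsGo]
      split_ifs with h1 h2 h3
      · exact ⟨[], by simp⟩
      · exact ⟨[], by simp⟩
      · exact ⟨[], by simp⟩
      · obtain ⟨t, ht⟩ := ih.2 actionsP s (seen ++ [s])
        exact ⟨[s] ++ t, by rw [ht, List.append_assoc]⟩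
    refine ⟨hD, ?_⟩
    intro as
    induction as with
    | nil => exact fun s seen => ⟨[], by simp [tryActs]⟩
    | cons a as iha =>
      intro s seen
      rw [tryActs]
      obtain ⟨t1, ht1⟩ := hD (stepP s a) seen
      rcases hd : dfsGo (f+1) (stepP s a) seen with ⟨res, seen'⟩
      rw [hd] at ht1
      simp only at ht1
      subst ht1
      rcases res with _ | ⟨_ | ⟨h, tl⟩⟩
      · obtain ⟨t2, ht2⟩ := iha s (seen ++ t1)
        exact ⟨t1 ++ t2, by simpa [List.append_assoc] using ht2⟩
      · obtain ⟨t2, ht2⟩ := iha s (seen ++ t1)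
        exact ⟨t1 ++ t2, by simpa [List.append_assoc] using ht2⟩
      · exact ⟨t1, rfl⟩

-- the running result of the action loop is never `some []`
theorem tryActs_shape : ∀ (f : Nat) (as : List (Int × Int)) (s seen),
    (tryActs f as s seen).1 = none ∨ ∃ t, (tryActs f as s seen).1 = some (s :: t) := by
  intro f as s
  induction as with
  | nil => intro seen; left; simp [tryActs]
  | cons a as iha =>
    intro seen
    rw [tryActs]
    rcases hd : dfsGo f (stepP s a) seen with ⟨res, seen'⟩
    rcases res with _ | ⟨_ | ⟨h, tl⟩⟩
    · exact iha seen'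
    · exact iha seen'
    · right; exact ⟨h :: tl, rfl⟩

-- what the stack loop does with the outcome of one recursive A-call
def contB (p : List (Int × Int × Bool)) (rest : List ((Int × Int × Bool) × List (Int × Int × Bool)))
    : Option (List (Int × Int × Bool)) × List (Int × Int × Bool) → Option (List (Int × Int × Bool))
  | (some (h :: t), _) => some (p ++ h :: t)
  | (_, seen') => loopB rest seen'

-- THE BRIDGE: popping a frame behaves like one recursive call of A, and the pending
-- child frames of one expansion behave like A's action loop.
theorem bridge : ∀ f : Nat,
    (∀ s p rest seen, muB seen < f →
      loopB ((s, p) :: rest) seen = contB p rest (dfsGo f s seen)) ∧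
    (∀ as s p rest seen, muB seen < f →
      loopB ((as.map (fun a => (stepP s a, p ++ [s]))) ++ rest) seen
        = contB p rest (tryActs f as s seen)) := by
  intro f
  induction f with
  | zero => exact ⟨fun _ _ _ _ h => absurd h (by omega), fun _ _ _ _ _ h => absurd h (by omega)⟩
  | succ f ih =>
    have hP : ∀ s p rest seen, muB seen < f + 1 →
        loopB ((s, p) :: rest) seen = contB p rest (dfsGo (f+1) s seen) := by
      intro s p rest seen hmu
      rw [loopB, dfsGo]
      by_cases h1 : s ∈ seen
      · rw [if_pos (Or.inl h1), if_pos h1]; rfl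
      · rw [if_neg h1]
        by_cases h2 : validP s = false
        · rw [if_pos (Or.inr h2), if_pos h2]; rfl
        · rw [if_neg (by tauto), if_neg h2]
          by_cases h3 : goalStateP = s
          · rw [if_pos h3.symm, if_pos h3]; rfl
          · rw [if_neg (fun hh => h3 hh.symm), if_neg h3]
            rw [childrenB_reverse]
            have hv : validP s = true := by
              cases hvb : validP s
              · exact absurd hvb h2
              · rfl
            have hlt : muB (seen ++ [s]) < f := by
              have := muB_append_lt hv h1; omega
            exact ih.2 actionsP s p rest (seen ++ [s]) hlt
    refine ⟨hP, ?_⟩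
    intro as
    induction as with
    | nil =>
      intro s p rest seen hmu
      simp only [List.map_nil, List.nil_append]
      rw [tryActs]
      rfl
    | cons a as iha =>
      intro s p rest seen hmu
      simp only [List.map_cons, List.cons_append]
      rw [hP (stepP s a) (p ++ [s]) _ seen hmu, tryActs]
      obtain ⟨t1, ht1⟩ := (seen_grows (f+1)).1 (stepP s a) seen
      rcases hd : dfsGo (f+1) (stepP s a) seen with ⟨res, seen'⟩
      rw [hd] at ht1
      simp only at ht1
      subst ht1
      rcases res with _ | ⟨_ | ⟨h, tl⟩⟩
      · show loopB _ _ = contB p rest (tryActs (f+1) as s (seen ++ t1))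
        exact iha s p rest (seen ++ t1) (lt_of_le_of_lt muB_mono hmu)
      · show loopB _ _ = contB p rest (tryActs (f+1) as s (seen ++ t1))
        exact iha s p rest (seen ++ t1) (lt_of_le_of_lt muB_mono hmu)
      · show some ((p ++ [s]) ++ h :: tl) = some (p ++ s :: h :: tl)
        simp

-- ===== VERDICT (by name: the statement is the Claim_ definition above) =====
theorem dfs_spec : Claim_equal_dfs := by
  intro state seen _
  unfold Spec_dfs dfs dfs_alt
  rw [show (32 : Nat) = 31 + 1 from rfl, dfsGo]
  by_cases h1 : state ∈ seen
  · rw [if_pos h1, if_pos h1]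
  · rw [if_neg h1, if_neg h1]
    by_cases h2 : validP state = false
    · rw [if_pos h2, if_pos h2]
    · rw [if_neg h2, if_neg h2]
      by_cases h3 : goalStateP = state
      · rw [if_pos h3, if_pos h3.symm]
      · rw [if_neg h3, if_neg (fun hh => h3 hh.symm)]
        rw [childrenB_reverse]
        have hb := (bridge 31).2 actionsP state [] [] (seen ++ [state])
          (by have := muB_le_20 (seen ++ [state]); omega)
        simp only [List.nil_append, List.append_nil] at hb
        rw [hb]
        rcases hres : tryActs 31 actionsP state (seen ++ [state]) with ⟨res, sn⟩
        rcases tryActs_shape 31 actionsP state (seen ++ [state]) with hsh | ⟨t, hsh⟩ <;>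
          rw [hres] at hsh <;> simp only at hsh <;> subst hsh
        · simp [contB, loopB]
        · simp [contB]
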